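-- pv_equiv track=rewrite | github.com/pedrojgalera/HackathonCategoriaBiomedica | CorpusProcessing/processFiles.py | find_some
-- ===== SOURCE A (Python) =====
-- def find_some(words, texts):
--     found = False
--     for word in words:
--         for text in texts:
--             if text.find(word)!=-1:
--                 found=True
--                 break
--         if found:
--             break
--     return found
-- ===== SOURCE B (Python) =====
-- def find_some(words, texts):
--     wordset = set(words)
--     if "" in wordset:
--         return bool(texts)
--     lengths = {len(w) for w in wordset}
--     return any(
--         text[i:i + l] in wordset
--         for text in texts
--         for l in lengths
--         for i in range(len(text) - l + 1)
--     )
-- ===== Notes on version B (the rewrite author's own statement) =====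
-- stated objective: alternative
-- what changed: B builds a hash set of the words once and, per text, tests set membership of each substring whose length is one of the distinct word lengths, instead of A's flag-and-break scan running text.find(word) for every (word, text) pair.
import Mathlib
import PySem

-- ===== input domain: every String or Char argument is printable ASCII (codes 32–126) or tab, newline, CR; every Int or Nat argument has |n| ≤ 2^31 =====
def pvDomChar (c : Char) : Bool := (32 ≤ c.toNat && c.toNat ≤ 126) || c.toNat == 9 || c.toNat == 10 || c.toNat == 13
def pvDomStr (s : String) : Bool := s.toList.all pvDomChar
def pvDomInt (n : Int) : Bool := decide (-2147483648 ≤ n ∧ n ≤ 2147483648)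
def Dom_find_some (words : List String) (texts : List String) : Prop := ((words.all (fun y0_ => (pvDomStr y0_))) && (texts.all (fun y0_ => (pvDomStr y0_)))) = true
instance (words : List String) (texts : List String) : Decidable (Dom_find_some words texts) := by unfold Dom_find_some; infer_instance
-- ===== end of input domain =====

-- B replaces A's per-word scan of every text (text.find(word) per pair) by one hash set of the
-- words queried with each text substring whose length is a word length (alternative algorithm).

-- ===== PORT A =====
-- inner 'for text in texts: if text.find(word)!=-1: found=True; break' as early-return recursion
def findSomeInner (word : String) : List String → Bool
  | [] => false
  | t :: ts => if PySem.Str.find t word ≠ -1 then true else findSomeInner word ts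

-- outer 'for word in words: … if found: break'
def findSomeOuter (texts : List String) : List String → Bool
  | [] => false
  | w :: ws => if findSomeInner w texts then true else findSomeOuter texts ws

def find_some (words : List String) (texts : List String) : Bool :=
  findSomeOuter texts words

-- ===== PORT B =====
def find_some_alt (words : List String) (texts : List String) : Bool :=
  let wordset := PySem.Set.ofList words
  if PySem.Set.contains wordset "" then !texts.isEmpty
  else
    let lengths : PySem.Set Int := PySem.Set.ofList (wordset.map (fun w => PySem.Str.len w))
    texts.any (fun t => lengths.any (fun l =>
      (PySem.List.pyRange 0 (PySem.Str.len t - l + 1)).any (fun i =>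
        PySem.Set.contains wordset (PySem.Str.slice t (some i) (some (i + l))))))

-- ===== PRECONDITION & SPEC =====
def Spec_find_some (words : List String) (texts : List String) (out : Bool) : Prop := out = find_some_alt words texts
instance (words : List String) (texts : List String) (out : Bool) : Decidable (Spec_find_some words texts out) := by unfold Spec_find_some; infer_instance

-- ===== CLAIM (what is proved, stated in full; the proofs are below) =====
def Claim_equal_find_some : Prop := ∀ (words : List String) (texts : List String), Dom_find_some words texts → Spec_find_some words texts (find_some words texts)

-- ===== LEMMAS AND PROOFS =====

-- the common meaning of both programs
def FoundProp (words : List String) (texts : List String) : Prop :=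
  ∃ w ∈ words, ∃ t ∈ texts, w.toList <:+: t.toList

lemma findSomeInner_iff (w : String) (ts : List String) :
    findSomeInner w ts = true ↔ ∃ t ∈ ts, w.toList <:+: t.toList := by
  induction ts with
  | nil => simp [findSomeInner]
  | cons t ts ih =>
    simp only [findSomeInner, PySem.Str.find_eq]
    by_cases h : PySem.Chars.find t.toList w.toList = -1
    · simp [h, ih, (PySem.Chars.find_eq_neg_one_iff t.toList w.toList).mp h]
    · simp [h, (PySem.Chars.find_ne_neg_one_iff t.toList w.toList).mp h]

lemma find_some_iff (words texts : List String) :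
    find_some words texts = true ↔ FoundProp words texts := by
  unfold find_some FoundProp
  induction words with
  | nil => simp [findSomeOuter]
  | cons w ws ih =>
    simp only [findSomeOuter]
    by_cases h : findSomeInner w texts = true
    · simp [h, (findSomeInner_iff w texts).mp h]
    · have hno : ¬ ∃ t ∈ texts, w.toList <:+: t.toList := fun hx =>
        h ((findSomeInner_iff w texts).mpr hx)
      simp [h, ih, hno]

lemma slice_infix (xs : List Char) (a b : Option Int) :
    PySem.List.slice xs a b <:+: xs := by
  simp only [PySem.List.slice]
  exact ((List.take_prefix _ _).isInfix).trans ((List.drop_suffix _ _).isInfix)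

lemma find_some_alt_iff (words texts : List String) :
    find_some_alt words texts = true ↔ FoundProp words texts := by
  unfold find_some_alt FoundProp
  by_cases hempty : "" ∈ words
  · rw [if_pos ((PySem.Set.contains_iff _ _).mpr ((PySem.Set.mem_ofList _ _).mpr hempty))]
    cases texts with
    | nil => simp
    | cons t ts =>
      simp only [List.isEmpty_cons, Bool.not_false, true_iff]
      exact ⟨"", hempty, t, List.mem_cons_self, by simp⟩
  · rw [if_neg (fun hc => hempty ((PySem.Set.mem_ofList _ _).mp
      ((PySem.Set.contains_iff _ _).mp hc)))]
    simp only [List.any_eq_true, PySem.Set.contains_iff, PySem.Set.mem_ofList,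
      PySem.List.mem_pyRange_one, List.mem_map]
    constructor
    · rintro ⟨t, ht, l, -, i, ⟨-, -⟩, hw⟩
      refine ⟨_, hw, t, ht, ?_⟩
      have := slice_infix t.toList (some i) (some (i + l))
      simpa [PySem.Str.toList_slice, PySem.Chars.slice_eq_listSlice] using this
    · rintro ⟨w, hw, t, ht, s₁, s₂, heq⟩
      refine ⟨t, ht, PySem.Str.len w,
        ⟨w, hw, rfl⟩,
        (s₁.length : Int), ⟨by positivity, ?_⟩, ?_⟩
      · have hlen : t.toList.length = s₁.length + w.toList.length + s₂.length := by
          rw [← heq]; simp; omega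
        simp only [PySem.Str.len_eq]
        omega
      · have hslice : (PySem.Str.slice t (some (s₁.length : Int))
            (some ((s₁.length : Int) + PySem.Str.len w))).toList = w.toList := by
          rw [PySem.Str.toList_slice, PySem.Chars.slice_eq_listSlice, PySem.Str.len_eq,
            PySem.List.slice_natCast_add t.toList s₁.length w.toList.length, ← heq]
          rw [show s₁ ++ w.toList ++ s₂ = s₁ ++ (w.toList ++ s₂) by simp,
            List.drop_left, List.take_left]
        rw [String.toList_inj.mp hslice]
        exact hw

theorem find_some_eq (words texts : List String) :
    find_some words texts = find_some_alt words texts :=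
  Bool.eq_iff_iff.mpr ((find_some_iff words texts).trans (find_some_alt_iff words texts).symm)

-- ===== VERDICT (by name: the statement is the Claim_ definition above) =====
theorem find_some_spec : Claim_equal_find_some := by
  intro words texts _
  exact find_some_eq words texts
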